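-- pv_equiv track=rewrite | github.com/doushenyiyezhiqiu/amazon_ng_oa1 | greyness.py | greyness
-- ===== SOURCE A (Python) =====
-- def greyness(array):
--     m, n = len(array[0]), len(array)
--     row_black = [0]*n
--     column_black = [0]*m
--     row_white = [0]*n
--     column_white = [0]*m
--
--     for i in range(n):
--         row_black[i] = array[i].count('1')
--         row_white[i] = m-1-row_black[i]
--
--     for i in range(m):
--         blacks, whites = 0, 0
--         for j in range(n):
--             if array[j][i] == '0':
--                 whites += 1
--             else:
--                 blacks += 1
--         column_black[i] = blacks
--         column_white[i] = whites
--
--     ans = 0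
--     for i in range(n):
--         for j in range(m):
--             ans = max(abs((row_black[i]+column_black[j])-(row_white[i]+column_white[j])), ans)
--     return ans
-- ===== SOURCE B (Python) =====
-- def greyness(array):
--     n, m = len(array), len(array[0])
--     rows = [2 * row.count('1') - (m - 1) for row in array]
--     cols = [2 * sum(row[j] != '0' for row in array) - n for j in range(m)]
--     return max(max(rows) + max(cols), -(min(rows) + min(cols)))
-- ===== Notes on version B (the rewrite author's own statement) =====
-- stated objective: faster
-- what changed: B replaces A's exhaustive O(n*m) scan over all row/column index pairs with the closed form max(maxRow+maxCol, -(minRow+minCol)) over per-row and per-column contrast values, so the pairing step is O(n+m) instead of O(n*m).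
-- outside the precondition, e.g. on greyness(['']): A returns 0, B raises ValueError
import Mathlib
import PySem

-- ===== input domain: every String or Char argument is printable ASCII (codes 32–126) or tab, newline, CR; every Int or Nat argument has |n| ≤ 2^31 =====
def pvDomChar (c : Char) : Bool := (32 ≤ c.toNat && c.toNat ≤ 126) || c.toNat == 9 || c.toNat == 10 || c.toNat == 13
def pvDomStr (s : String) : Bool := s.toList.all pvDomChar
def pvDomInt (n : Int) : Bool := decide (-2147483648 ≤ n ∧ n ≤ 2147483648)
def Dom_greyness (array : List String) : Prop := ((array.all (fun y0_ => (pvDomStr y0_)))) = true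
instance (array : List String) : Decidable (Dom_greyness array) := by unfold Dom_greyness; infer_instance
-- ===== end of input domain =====

-- B replaces A's O(n*m) scan over all row/column pairs by the closed form
-- max(maxRow+maxCol, -(minRow+minCol)) over the per-row / per-column contrast values (objective: faster).

-- ===== PORT A =====
-- literal port of A; array[i] inside loops over range(len(array)) is always in range, so pyGetD is exact there
def greyness (array : List String) : Int :=
  let m : Int := ((array.headD "").length : Int)   -- len(array[0]); Pre_ excludes [] where Python raises IndexError
  let n : Int := (array.length : Int)
  let rbw := (PySem.List.pyRange 0 n 1).foldl (fun (p : List Int × List Int) i =>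
      let cnt : Int := (PySem.Str.count (PySem.List.pyGetD array i "") "1" : Int)
      (PySem.List.pySetD p.1 i cnt, PySem.List.pySetD p.2 i (m - 1 - cnt)))
    (List.replicate n.toNat 0, List.replicate n.toNat 0)
  let row_black := rbw.1
  let row_white := rbw.2
  let cbw := (PySem.List.pyRange 0 m 1).foldl (fun (p : List Int × List Int) i =>
      let bw := (PySem.List.pyRange 0 n 1).foldl (fun (bw : Int × Int) j =>
          if PySem.Str.pyGet? (PySem.List.pyGetD array j "") i = some '0' then (bw.1, bw.2 + 1)
          else (bw.1 + 1, bw.2)) (0, 0)   -- array[j][i]; Pre_ excludes rows shorter than m (Python IndexError)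
      (PySem.List.pySetD p.1 i bw.1, PySem.List.pySetD p.2 i bw.2))
    (List.replicate m.toNat 0, List.replicate m.toNat 0)
  let column_black := cbw.1
  let column_white := cbw.2
  (PySem.List.pyRange 0 n 1).foldl (fun ans i =>
    (PySem.List.pyRange 0 m 1).foldl (fun ans j =>
      max |(PySem.List.pyGetD row_black i 0 + PySem.List.pyGetD column_black j 0) -
          (PySem.List.pyGetD row_white i 0 + PySem.List.pyGetD column_white j 0)| ans) ans) 0

-- ===== PORT B =====
-- max() / min() of a nonempty Python int list (Source B only applies them to nonempty lists under Pre_)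
def pyMaxList (l : List Int) : Int := match l with | [] => 0 | x :: xs => xs.foldl max x
def pyMinList (l : List Int) : Int := match l with | [] => 0 | x :: xs => xs.foldl min x

def greyness_alt (array : List String) : Int :=
  let n : Int := (array.length : Int)
  let m : Int := ((array.headD "").length : Int)   -- len(array[0])
  let rows := array.map (fun row => 2 * (PySem.Str.count row "1" : Int) - (m - 1))
  let cols := (PySem.List.pyRange 0 m 1).map (fun j =>
      2 * (array.foldl (fun acc row =>
            acc + (if PySem.Str.pyGet? row j = some '0' then 0 else 1)) 0) - n)
  max (pyMaxList rows + pyMaxList cols) (-(pyMinList rows + pyMinList cols))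

-- ===== PRECONDITION & SPEC =====
-- Pre_ excludes the inputs where Python A raises IndexError — the empty list (len(array[0]))
-- and grids whose later rows are shorter than the first row (array[j][i]) — and grids whose
-- first row is empty, where A returns 0 but B's max() over the empty column list raises ValueError.
def Pre_greyness (array : List String) : Prop :=
  array ≠ [] ∧ (array.headD "").length ≠ 0 ∧ ∀ s ∈ array, (array.headD "").length ≤ s.length
instance (array : List String) : Decidable (Pre_greyness array) := by unfold Pre_greyness; infer_instance

def pvWitness_greyness : List String := ["10x", "011"]

def Spec_greyness (array : List String) (out : Int) : Prop := out = greyness_alt array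
instance (array : List String) (out : Int) : Decidable (Spec_greyness array out) := by unfold Spec_greyness; infer_instance

-- ===== CLAIM (what is proved, stated in full; the proofs are below) =====
def Claim_equal_greyness : Prop := ∀ (array : List String), Dom_greyness array → Pre_greyness array → Spec_greyness array (greyness array)

-- ===== LEMMAS AND PROOFS =====

-- generic foldl bounds
theorem pvFoldl_le_of_step {α : Type} (F : Int → α → Int) (hF : ∀ a x, a ≤ F a x) :
    ∀ (l : List α) (a : Int), a ≤ l.foldl F a := by
  intro l
  induction l with
  | nil => intro a; simp
  | cons x xs ih => intro a; exact le_trans (hF a x) (ih (F a x))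

theorem pvFoldl_le_bound {α : Type} (F : Int → α → Int) (b : Int) :
    ∀ (l : List α), (∀ a x, a ≤ b → x ∈ l → F a x ≤ b) →
      ∀ a, a ≤ b → l.foldl F a ≤ b := by
  intro l
  induction l with
  | nil => intro _ a ha; simpa using ha
  | cons x xs ih =>
      intro h a ha
      exact ih (fun a y ha hy => h a y ha (List.mem_cons_of_mem _ hy)) _
        (h a x ha List.mem_cons_self)

theorem pvFoldl_lb_mem {α : Type} (F : Int → α → Int) (hF : ∀ a x, a ≤ F a x)
    (c : Int) (x0 : α) (hx : ∀ a, c ≤ F a x0) :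
    ∀ (l : List α) (a : Int), x0 ∈ l → c ≤ l.foldl F a := by
  intro l
  induction l with
  | nil => intro a h; simp at h
  | cons x xs ih =>
      intro a h
      rcases List.mem_cons.mp h with h | h
      · subst h; exact le_trans (hx a) (pvFoldl_le_of_step F hF xs _)
      · exact ih (F a x) h

theorem pvPyMaxList_mem (l : List Int) (h : l ≠ []) : pyMaxList l ∈ l := by
  match l with
  | x :: xs =>
    simp only [pyMaxList]
    have : ∀ (t : List Int) (a : Int), t.foldl max a = a ∨ t.foldl max a ∈ t := by
      intro t
      induction t with
      | nil => intro a; simp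
      | cons y ys ih =>
          intro a
          rcases ih (max a y) with h1 | h1
          · rcases max_choice a y with h2 | h2
            · left; rw [List.foldl_cons, h1, h2]
            · right; rw [List.foldl_cons, h1, h2]; exact List.mem_cons_self
          · right; rw [List.foldl_cons]; exact List.mem_cons_of_mem _ h1
    rcases this xs x with h1 | h1
    · rw [h1]; exact List.mem_cons_self
    · exact List.mem_cons_of_mem _ h1

theorem pvLe_pyMaxList (l : List Int) (x : Int) (hx : x ∈ l) : x ≤ pyMaxList l := by
  match l with
  | y :: ys =>
    simp only [pyMaxList]
    rcases List.mem_cons.mp hx with h | h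
    · subst h; exact (PySem.List.le_foldl_max ys x).1
    · exact (PySem.List.le_foldl_max ys y).2 x h

theorem pvPyMinList_mem (l : List Int) (h : l ≠ []) : pyMinList l ∈ l := by
  match l with
  | x :: xs =>
    simp only [pyMinList]
    have : ∀ (t : List Int) (a : Int), t.foldl min a = a ∨ t.foldl min a ∈ t := by
      intro t
      induction t with
      | nil => intro a; simp
      | cons y ys ih =>
          intro a
          rcases ih (min a y) with h1 | h1
          · rcases min_choice a y with h2 | h2
            · left; rw [List.foldl_cons, h1, h2]
            · right; rw [List.foldl_cons, h1, h2]; exact List.mem_cons_self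
          · right; rw [List.foldl_cons]; exact List.mem_cons_of_mem _ h1
    rcases this xs x with h1 | h1
    · rw [h1]; exact List.mem_cons_self
    · exact List.mem_cons_of_mem _ h1

theorem pvPyMinList_le (l : List Int) (x : Int) (hx : x ∈ l) : pyMinList l ≤ x := by
  match l with
  | y :: ys =>
    simp only [pyMinList]
    have key : ∀ (t : List Int) (a : Int), t.foldl min a ≤ a ∧ ∀ z ∈ t, t.foldl min a ≤ z := by
      intro t
      induction t with
      | nil => intro a; simp
      | cons z zs ih =>
          intro a
          refine ⟨le_trans (ih (min a z)).1 (min_le_left _ _), ?_⟩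
          intro w hw
          rcases List.mem_cons.mp hw with h | h
          · subst h; exact le_trans (ih (min a w)).1 (min_le_right _ _)
          · exact (ih (min a z)).2 w h
    rcases List.mem_cons.mp hx with h | h
    · subst h; exact (key ys x).1
    · exact (key ys y).2 x h

-- the set-building loops: length invariant and pointwise values
theorem pvFoldl_set_pair_length (f g : Nat → Int) (n : Nat) :
    ∀ (L1 L2 : List Int),
      (((List.range n).foldl (fun (p : List Int × List Int) i => (p.1.set i (f i), p.2.set i (g i))) (L1, L2)).1.length = L1.length) ∧
      (((List.range n).foldl (fun (p : List Int × List Int) i => (p.1.set i (f i), p.2.set i (g i))) (L1, L2)).2.length = L2.length) := by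
  induction n with
  | zero => intro L1 L2; simp
  | succ n ih =>
      intro L1 L2
      rw [List.range_succ, List.foldl_append]
      have := ih L1 L2
      constructor <;> simp [List.foldl_cons, List.length_set, this.1, this.2]

theorem pvFoldl_set_pair_getD (f g : Nat → Int) (n : Nat) :
    ∀ (L1 L2 : List Int) (k : Nat), k < n → n ≤ L1.length → n ≤ L2.length →
      (((List.range n).foldl (fun (p : List Int × List Int) i => (p.1.set i (f i), p.2.set i (g i))) (L1, L2)).1.getD k 0 = f k) ∧
      (((List.range n).foldl (fun (p : List Int × List Int) i => (p.1.set i (f i), p.2.set i (g i))) (L1, L2)).2.getD k 0 = g k) := by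
  induction n with
  | zero => intro L1 L2 k hk; omega
  | succ n ih =>
      intro L1 L2 k hk h1 h2
      rw [List.range_succ, List.foldl_append, List.foldl_cons, List.foldl_nil]
      have hlen := pvFoldl_set_pair_length f g n L1 L2
      by_cases hkn : k = n
      · subst hkn
        constructor
        · rw [List.getD_eq_getElem?_getD, List.getElem?_set_self (by omega)]; rfl
        · rw [List.getD_eq_getElem?_getD, List.getElem?_set_self (by omega)]; rfl
      · have hk' : k < n := by omega
        have := ih L1 L2 k hk' (by omega) (by omega)
        constructor
        · rw [List.getD_eq_getElem?_getD, List.getElem?_set_ne (by omega : n ≠ k),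
            ← List.getD_eq_getElem?_getD]
          exact this.1
        · rw [List.getD_eq_getElem?_getD, List.getElem?_set_ne (by omega : n ≠ k),
            ← List.getD_eq_getElem?_getD]
          exact this.2

-- (range l.length).map (getD ·) recovers the list
theorem pvRange_getD_eq {α : Type} (l : List α) (d : α) :
    (List.range l.length).map (fun k => l.getD k d) = l := by
  apply List.ext_getElem
  · simp
  · intro k h1 h2
    simp [List.getD_eq_getElem?_getD, List.getElem?_eq_getElem h2]

theorem pvMap_range_getD {α β : Type} (l : List α) (d : α) (f : α → β) :
    (List.range l.length).map (fun k => f (l.getD k d)) = l.map f := by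
  have := congrArg (List.map f) (pvRange_getD_eq l d)
  simpa [List.map_map, Function.comp] using this

theorem pvFoldl_range_getD {α β : Type} (l : List α) (d : α) (f : β → α → β) (init : β) :
    (List.range l.length).foldl (fun acc k => f acc (l.getD k d)) init = l.foldl f init := by
  conv_rhs => rw [← pvRange_getD_eq l d]
  rw [List.foldl_map]

-- A's inner column loop: (blacks, whites) closed form
theorem pvColPair (P : String → Prop) [DecidablePred P] :
    ∀ (l : List String) (b w : Int),
      l.foldl (fun (bw : Int × Int) row => if P row then (bw.1, bw.2 + 1) else (bw.1 + 1, bw.2)) (b, w)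
        = (b + ((l.length : Int) - (l.countP (fun row => decide (P row)) : Int)),
           w + (l.countP (fun row => decide (P row)) : Int)) := by
  intro l
  induction l with
  | nil => intro b w; simp
  | cons x xs ih =>
      intro b w
      by_cases hx : P x
      · rw [List.foldl_cons, if_pos hx, ih]
        simp only [List.countP_cons, hx, decide_true, List.length_cons, Prod.mk.injEq]
        constructor <;> push_cast <;> ring
      · rw [List.foldl_cons, if_neg hx, ih]
        simp only [List.countP_cons, hx, decide_false, List.length_cons, Prod.mk.injEq]
        constructor <;> push_cast <;> ring

-- B's column sum closed form
theorem pvSumInd (P : String → Prop) [DecidablePred P] :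
    ∀ (l : List String) (a : Int),
      l.foldl (fun (acc : Int) row => acc + (if P row then 0 else 1)) a
        = a + ((l.length : Int) - (l.countP (fun row => decide (P row)) : Int)) := by
  intro l
  induction l with
  | nil => intro a; simp
  | cons x xs ih =>
      intro a
      by_cases hx : P x
      · rw [List.foldl_cons, if_pos hx, ih]
        simp only [List.countP_cons, hx, decide_true, List.length_cons]
        push_cast; ring
      · rw [List.foldl_cons, if_neg hx, ih]
        simp only [List.countP_cons, hx, decide_false, List.length_cons]
        push_cast; ring

-- the pair-search fold equals the closed form over extremes
theorem pvCore (n m : Nat) (hn : 0 < n) (hm : 0 < m) (G : Int → Int → Int) (X Y : Nat → Int)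
    (hG : ∀ (i j : Nat), i < n → j < m → G (i : Int) (j : Int) = |X i + Y j|) :
    (PySem.List.pyRange 0 (n : Int) 1).foldl (fun ans i =>
        (PySem.List.pyRange 0 (m : Int) 1).foldl (fun ans j => max (G i j) ans) ans) 0
      = max (pyMaxList ((List.range n).map X) + pyMaxList ((List.range m).map Y))
            (-(pyMinList ((List.range n).map X) + pyMinList ((List.range m).map Y))) := by
  set xs := (List.range n).map X with hxs
  set ys := (List.range m).map Y with hys
  have hxne : xs ≠ [] := by simp [hxs, List.map_eq_nil_iff, List.range_eq_nil]; omega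
  have hyne : ys ≠ [] := by simp [hys, List.map_eq_nil_iff, List.range_eq_nil]; omega
  set MR := pyMaxList xs
  set mR := pyMinList xs
  set MC := pyMaxList ys
  set mC := pyMinList ys
  set V := max (MR + MC) (-(mR + mC)) with hV
  have hxmem : ∀ i, i < n → X i ∈ xs := by
    intro i hi; rw [hxs]; exact List.mem_map_of_mem (by simpa using hi)
  have hymem : ∀ j, j < m → Y j ∈ ys := by
    intro j hj; rw [hys]; exact List.mem_map_of_mem (by simpa using hj)
  have hMRmR : mR ≤ MR := pvLe_pyMaxList xs _ (pvPyMinList_mem xs hxne)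
  have hMCmC : mC ≤ MC := pvLe_pyMaxList ys _ (pvPyMinList_mem ys hyne)
  have hV1 : MR + MC ≤ V := le_max_left _ _
  have hV2 : -(mR + mC) ≤ V := le_max_right _ _
  have hV0 : 0 ≤ V := by omega
  have habs : ∀ (i j : Nat), i < n → j < m → |X i + Y j| ≤ V := by
    intro i j hi hj
    have h1 : X i ≤ MR := pvLe_pyMaxList xs _ (hxmem i hi)
    have h2 : mR ≤ X i := pvPyMinList_le xs _ (hxmem i hi)
    have h3 : Y j ≤ MC := pvLe_pyMaxList ys _ (hymem j hj)
    have h4 : mC ≤ Y j := pvPyMinList_le ys _ (hymem j hj)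
    rw [abs_le]; omega
  -- the fold is ≤ V
  have hub : (PySem.List.pyRange 0 (n : Int) 1).foldl (fun ans i =>
        (PySem.List.pyRange 0 (m : Int) 1).foldl (fun ans j => max (G i j) ans) ans) 0 ≤ V := by
    apply pvFoldl_le_bound _ V _ ?_ 0 hV0
    intro a i ha hi
    rw [PySem.List.mem_pyRange_one] at hi
    apply pvFoldl_le_bound _ V _ ?_ a ha
    intro a' j ha' hj
    rw [PySem.List.mem_pyRange_one] at hj
    have hGij : G i j = |X i.toNat + Y j.toNat| := by
      have h1 : i = ((i.toNat : Nat) : Int) := by omega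
      have h2 : j = ((j.toNat : Nat) : Int) := by omega
      rw [h1, h2]; exact hG i.toNat j.toNat (by omega) (by omega)
    rw [hGij]
    exact max_le (habs i.toNat j.toNat (by omega) (by omega)) ha'
  -- every |X i + Y j| is ≤ the fold
  have hlb : ∀ (i j : Nat), i < n → j < m →
      |X i + Y j| ≤ (PySem.List.pyRange 0 (n : Int) 1).foldl (fun ans i =>
        (PySem.List.pyRange 0 (m : Int) 1).foldl (fun ans j => max (G i j) ans) ans) 0 := by
    intro i j hi hj
    apply pvFoldl_lb_mem _ ?_ _ ((i : Int)) ?_ _ 0 ?_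
    · intro a x
      exact pvFoldl_le_of_step _ (fun a' y => le_max_right _ _) _ a
    · intro a
      apply pvFoldl_lb_mem _ (fun a' y => le_max_right _ _) _ ((j : Int)) ?_ _ a ?_
      · intro a'
        rw [hG i j hi hj]
        exact le_max_left _ _
      · rw [PySem.List.mem_pyRange_one]; omega
    · rw [PySem.List.mem_pyRange_one]; omega
  apply le_antisymm hub
  rw [hV]
  apply max_le
  · obtain ⟨i, hi, hXi⟩ : ∃ i, i < n ∧ X i = MR := by
      have := pvPyMaxList_mem xs hxne
      rw [hxs] at this
      obtain ⟨k, hk, hXk⟩ := List.mem_map.mp this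
      exact ⟨k, by simpa using hk, hXk⟩
    obtain ⟨j, hj, hYj⟩ : ∃ j, j < m ∧ Y j = MC := by
      have := pvPyMaxList_mem ys hyne
      rw [hys] at this
      obtain ⟨k, hk, hYk⟩ := List.mem_map.mp this
      exact ⟨k, by simpa using hk, hYk⟩
    calc MR + MC = X i + Y j := by rw [hXi, hYj]
      _ ≤ |X i + Y j| := le_abs_self _
      _ ≤ _ := hlb i j hi hj
  · obtain ⟨i, hi, hXi⟩ : ∃ i, i < n ∧ X i = mR := by
      have := pvPyMinList_mem xs hxne
      rw [hxs] at this
      obtain ⟨k, hk, hXk⟩ := List.mem_map.mp this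
      exact ⟨k, by simpa using hk, hXk⟩
    obtain ⟨j, hj, hYj⟩ : ∃ j, j < m ∧ Y j = mC := by
      have := pvPyMinList_mem ys hyne
      rw [hys] at this
      obtain ⟨k, hk, hYk⟩ := List.mem_map.mp this
      exact ⟨k, by simpa using hk, hYk⟩
    calc -(mR + mC) = -(X i + Y j) := by rw [hXi, hYj]
      _ ≤ |X i + Y j| := neg_le_abs _
      _ ≤ _ := hlb i j hi hj

theorem pvMain (array : List String) (hne : array ≠ [])
    (hm : (array.headD "").length ≠ 0) :
    greyness array = greyness_alt array := by
  simp only [greyness, greyness_alt]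
  refine Eq.trans (pvCore array.length (array.headD "").length
      (List.length_pos_iff.mpr hne) (Nat.pos_of_ne_zero hm) _
      (fun i => 2 * ((PySem.Str.count (array.getD i "") "1" : Int)) - (((array.headD "").length : Int) - 1))
      (fun j => 2 * (((array.length : Int)) - ((array.countP (fun row => decide (PySem.Str.pyGet? row (j : Int) = some '0')) : Int))) - ((array.length : Int)))
      ?_) ?_
  · intro i j hi hj
    simp only [PySem.List.pyRange_zero_natCast, List.foldl_map, PySem.List.pySetD_natCast,
      PySem.List.pyGetD_natCast, Int.toNat_natCast]
    rw [(pvFoldl_set_pair_getD (fun k => (↑(PySem.Str.count (array.getD k "") "1") : Int))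
          (fun k => (↑(array.headD "").length : Int) - 1 - ↑(PySem.Str.count (array.getD k "") "1"))
          array.length (List.replicate array.length 0) (List.replicate array.length 0) i hi
          (by simp) (by simp)).1,
        (pvFoldl_set_pair_getD (fun k => (↑(PySem.Str.count (array.getD k "") "1") : Int))
          (fun k => (↑(array.headD "").length : Int) - 1 - ↑(PySem.Str.count (array.getD k "") "1"))
          array.length (List.replicate array.length 0) (List.replicate array.length 0) i hi
          (by simp) (by simp)).2,
        (pvFoldl_set_pair_getD
          (fun k => (List.foldl (fun (x : Int × Int) y =>
              if PySem.Str.pyGet? (array.getD y "") ↑k = some '0' then (x.1, x.2 + 1) else (x.1 + 1, x.2))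
              (0, 0) (List.range array.length)).1)
          (fun k => (List.foldl (fun (x : Int × Int) y =>
              if PySem.Str.pyGet? (array.getD y "") ↑k = some '0' then (x.1, x.2 + 1) else (x.1 + 1, x.2))
              (0, 0) (List.range array.length)).2)
          (array.headD "").length (List.replicate (array.headD "").length 0)
          (List.replicate (array.headD "").length 0) j hj (by simp) (by simp)).1,
        (pvFoldl_set_pair_getD
          (fun k => (List.foldl (fun (x : Int × Int) y =>
              if PySem.Str.pyGet? (array.getD y "") ↑k = some '0' then (x.1, x.2 + 1) else (x.1 + 1, x.2))
              (0, 0) (List.range array.length)).1)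
          (fun k => (List.foldl (fun (x : Int × Int) y =>
              if PySem.Str.pyGet? (array.getD y "") ↑k = some '0' then (x.1, x.2 + 1) else (x.1 + 1, x.2))
              (0, 0) (List.range array.length)).2)
          (array.headD "").length (List.replicate (array.headD "").length 0)
          (List.replicate (array.headD "").length 0) j hj (by simp) (by simp)).2,
        pvFoldl_range_getD array "" (fun (x : Int × Int) row =>
          if PySem.Str.pyGet? row ↑j = some '0' then (x.1, x.2 + 1) else (x.1 + 1, x.2)) (0, 0),
        pvColPair (fun row => PySem.Str.pyGet? row ↑j = some '0') array 0 0]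
    congr 1
    push_cast
    ring
  · rw [pvMap_range_getD array ""
        (fun row => 2 * (↑(PySem.Str.count row "1") : Int) - ((↑(array.headD "").length : Int) - 1)),
      PySem.List.pyRange_zero_natCast, List.map_map]
    have h2 : List.map
        ((fun j => 2 * List.foldl (fun acc row => acc + if PySem.Str.pyGet? row j = some '0' then 0 else 1) 0 array -
            (↑array.length : Int)) ∘ fun (k : Nat) => (↑k : Int))
        (List.range (array.headD "").length)
      = List.map
        (fun (j : Nat) =>
          2 * ((↑array.length : Int) - ↑(List.countP (fun row => decide (PySem.Str.pyGet? row ↑j = some '0')) array)) -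
            (↑array.length : Int))
        (List.range (array.headD "").length) := by
      apply List.map_congr_left
      intro k _
      simp only [Function.comp_apply]
      rw [pvSumInd (fun row => PySem.Str.pyGet? row ↑k = some '0') array 0]
      ring
    rw [h2]


-- ===== VERDICT (by name: the statement is the Claim_ definition above) =====
theorem greyness_spec : Claim_equal_greyness := by
  intro array _ hpre
  unfold Spec_greyness
  exact pvMain array hpre.1 hpre.2.1
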